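-- pv_equiv track=rewrite | github.com/CountChu/LeetCodePython | top_interview_questions/solutions/0034-search-range-p.py | find_left
-- ===== SOURCE A (Python) =====
-- def find_left(nums, k):
--     if k == 0:
--         return k
--
--     v1 = nums[k]
--
--     while True:
--         k -= 1
--         v0 = nums[k]
--         if v0 != v1:
--             return k + 1
--
--         if k == 0:
--             return k
-- ===== SOURCE B (Python) =====
-- def find_left(nums, k):
--     # Forward pass: track the start index of the current run of equal values
--     # over nums[0..k]; the run containing index k starts at `start`.
--     start = 0
--     for i in range(1, k + 1):
--         if nums[i] != nums[i - 1]: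
--             start = i
--     return start
-- ===== Notes on version B (the rewrite author's own statement) =====
-- stated objective: alternative
-- what changed: A walks backward from index k comparing each element with nums[k] until a mismatch; B makes one forward pass over nums[0..k], tracking the start index of the current run of equal adjacent values, and returns that run start.
-- outside the precondition, e.g. on find_left([1, 2], -1): A returns -1, B returns 0; on find_left([5, 5], -1): A raises IndexError, B returns 0
import Mathlib
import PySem

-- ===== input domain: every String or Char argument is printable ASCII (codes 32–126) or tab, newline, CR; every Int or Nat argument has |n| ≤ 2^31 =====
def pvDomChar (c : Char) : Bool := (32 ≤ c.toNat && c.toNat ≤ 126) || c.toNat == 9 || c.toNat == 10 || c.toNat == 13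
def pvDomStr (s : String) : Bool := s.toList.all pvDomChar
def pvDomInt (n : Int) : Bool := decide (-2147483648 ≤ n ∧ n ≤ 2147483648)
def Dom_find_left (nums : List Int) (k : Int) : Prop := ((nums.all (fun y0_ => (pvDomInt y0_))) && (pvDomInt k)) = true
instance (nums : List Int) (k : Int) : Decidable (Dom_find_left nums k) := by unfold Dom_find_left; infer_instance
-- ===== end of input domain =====

-- B replaces A's backward scan from index k by a single forward pass over
-- nums[0..k] that tracks the start of the current run of equal adjacent values
-- (objective: alternative decomposition; no speed claim).

-- ===== PORT A =====
-- 'while True' loop of A: entered with current k (decremented first inside);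
-- fuel-bounded recursion; fuel never runs out on inputs in Pre_ (IndexError = pyGet? none → default 0 outside Pre_).
def findLeftLoop (nums : List Int) (v1 : Int) (k : Int) : Nat → Int
  | 0 => 0
  | f + 1 =>
    -- k -= 1 (the decremented k is written k - 1 throughout this iteration)
    match PySem.List.pyGet? nums (k - 1) with
    | none => 0
    | some v0 =>
      if v0 ≠ v1 then (k - 1) + 1
      else if k - 1 = 0 then k - 1
      else findLeftLoop nums v1 (k - 1) f

def find_left (nums : List Int) (k : Int) : Int :=
  if k = 0 then k
  else
    match PySem.List.pyGet? nums k with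
    | none => 0
    | some v1 => findLeftLoop nums v1 k (k.toNat + nums.length + 1)

-- ===== PORT B =====
def find_left_alt (nums : List Int) (k : Int) : Int :=
  (PySem.List.pyRange 1 (k + 1) 1).foldl
    (fun start i =>
      match PySem.List.pyGet? nums i, PySem.List.pyGet? nums (i - 1) with
      | some a, some b => if a ≠ b then i else start
      | _, _ => start)
    0

-- ===== PRECONDITION & SPEC =====
-- Pre_ restricts k to the natural index domain: k = 0 (A returns 0 without reading
-- nums) or 0 < k < len(nums). For k ≥ len(nums) A raises IndexError; for k < 0
-- (outside the task's natural domain) A mixes negative-index wraparound values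
-- and IndexError, so those inputs are excluded rather than mirrored.
def Pre_find_left (nums : List Int) (k : Int) : Prop :=
  k = 0 ∨ (0 < k ∧ k < nums.length)
instance (nums : List Int) (k : Int) : Decidable (Pre_find_left nums k) := by
  unfold Pre_find_left; infer_instance

def pvWitness_find_left : List Int × Int := ([3, 5, 5, 7], 2)

def Spec_find_left (nums : List Int) (k : Int) (out : Int) : Prop := out = find_left_alt nums k
instance (nums : List Int) (k : Int) (out : Int) : Decidable (Spec_find_left nums k out) := by unfold Spec_find_left; infer_instance

-- ===== CLAIM (what is proved, stated in full; the proofs are below) =====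
def Claim_equal_find_left : Prop := ∀ (nums : List Int) (k : Int), Dom_find_left nums k → Pre_find_left nums k → Spec_find_left nums k (find_left nums k)

-- ===== LEMMAS AND PROOFS =====

-- Nat-indexed characterisation: start index of the run of equal values ending at n.
def runStart (nums : List Int) : Nat → Int
  | 0 => 0
  | n + 1 => if nums.getD (n + 1) 0 ≠ nums.getD n 0 then ((n : Int) + 1) else runStart nums n

lemma find_left_alt_eq_runStart (nums : List Int) (n : Nat) (hn : n < nums.length) :
    find_left_alt nums (n : Int) = runStart nums n := by
  induction n with
  | zero =>
    simp [find_left_alt, runStart, PySem.List.pyRange_one_eq_nil]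
  | succ m ih =>
    have hm : m < nums.length := Nat.lt_of_succ_lt hn
    unfold find_left_alt
    have hsplit : PySem.List.pyRange 1 ((m : Int) + 1 + 1) 1
        = PySem.List.pyRange 1 ((m : Int) + 1) 1 ++ [(m : Int) + 1] := by
      have := PySem.List.pyRange_one_succ_right (a := 1) (b := (m : Int) + 1) (by omega)
      simpa using this
    have hget1 : PySem.List.pyGet? nums ((m : Int) + 1) = some (nums.getD (m + 1) 0) := by
      rw [show ((m : Int) + 1) = ((m + 1 : Nat) : Int) by push_cast; ring,
        PySem.List.pyGet?_natCast, List.getElem?_eq_getElem hn, List.getD_eq_getElem _ _ hn]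
    have hget0 : PySem.List.pyGet? nums ((m : Int) + 1 - 1) = some (nums.getD m 0) := by
      rw [show ((m : Int) + 1 - 1) = ((m : Nat) : Int) by ring,
        PySem.List.pyGet?_natCast, List.getElem?_eq_getElem hm, List.getD_eq_getElem _ _ hm]
    rw [show ((m + 1 : Nat) : Int) = (m : Int) + 1 by push_cast; ring, hsplit, List.foldl_append]
    simp only [List.foldl_cons, List.foldl_nil, hget1, hget0]
    unfold find_left_alt at ih
    rw [ih hm]
    by_cases h : nums.getD (m + 1) 0 = nums.getD m 0 <;> simp [runStart, h]

-- A's loop, entered with k = n (1 ≤ n < len, fuel ≥ n) and v1 equal to nums current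
-- run value, computes the run start.
lemma findLeftLoop_eq_runStart (nums : List Int) :
    ∀ (n : Nat) (f : Nat), 1 ≤ n → n < nums.length → n ≤ f →
    findLeftLoop nums (nums.getD n 0) (n : Int) f = runStart nums n := by
  intro n
  induction n with
  | zero => intro f h1 _ _; omega
  | succ m ih =>
    intro f h1 hlen hf
    obtain ⟨f', rfl⟩ : ∃ f', f = f' + 1 := ⟨f - 1, by omega⟩
    have hm : m < nums.length := Nat.lt_of_succ_lt hlen
    unfold findLeftLoop
    have hk' : ((m + 1 : Nat) : Int) - 1 = ((m : Nat) : Int) := by push_cast; ring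
    rw [hk', PySem.List.pyGet?_natCast, List.getElem?_eq_getElem hm]
    change (if nums[m] ≠ nums.getD (m + 1) 0 then ((m : Nat) : Int) + 1
        else if ((m : Nat) : Int) = 0 then ((m : Nat) : Int)
        else findLeftLoop nums (nums.getD (m + 1) 0) ((m : Nat) : Int) f') = runStart nums (m + 1)
    have hstep : runStart nums (m + 1)
        = if nums.getD (m + 1) 0 ≠ nums.getD m 0 then ((m : Int) + 1) else runStart nums m := rfl
    by_cases hne : nums[m] ≠ nums.getD (m + 1) 0
    · rw [if_pos hne, hstep,
        if_pos (by rw [List.getD_eq_getElem _ _ hm]; exact fun h => hne h.symm)]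
    · rw [ne_eq, not_not] at hne
      rw [if_neg (by simpa using hne)]
      have hrs : runStart nums (m + 1) = runStart nums m := by
        rw [hstep, if_neg (by rw [List.getD_eq_getElem _ _ hm]; simpa using hne.symm)]
      by_cases hm0 : m = 0
      · subst hm0
        rw [hrs]
        norm_num [runStart]
      · rw [if_neg (by exact_mod_cast hm0)]
        rw [hrs, ← ih f' (by omega) hm (by omega)]
        congr 1
        rw [List.getD_eq_getElem _ _ hm, ← hne]

-- ===== VERDICT (by name: the statement is the Claim_ definition above) =====
theorem find_left_spec : Claim_equal_find_left := by
  intro nums k _ hpre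
  unfold Spec_find_left
  rcases hpre with rfl | ⟨hk0, hklen⟩
  · simp [find_left, find_left_alt, PySem.List.pyRange_one_eq_nil]
  · obtain ⟨n, rfl⟩ : ∃ n : Nat, k = (n : Int) := ⟨k.toNat, (Int.toNat_of_nonneg (by omega)).symm⟩
    have hn1 : 1 ≤ n := by exact_mod_cast hk0
    have hnlen : n < nums.length := by exact_mod_cast hklen
    unfold find_left
    rw [if_neg (by omega : ¬ ((n : Int) = 0)), PySem.List.pyGet?_natCast,
      List.getElem?_eq_getElem hnlen]
    show findLeftLoop nums nums[n] ((n : Int)) (((n : Int)).toNat + nums.length + 1) = _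
    rw [show nums[n] = nums.getD n 0 from (List.getD_eq_getElem _ _ hnlen).symm]
    rw [findLeftLoop_eq_runStart nums n _ hn1 hnlen (by omega),
      find_left_alt_eq_runStart nums n hnlen]
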